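-- pv_equiv track=rewrite | github.com/bible-codes/bible-codes.github.io | tools/build-date-els-index.py | year_to_hebrew
-- ===== SOURCE A (Python) =====
-- def year_to_hebrew(n):
--     """Convert year value (e.g. 786 for 5786) to Hebrew letter string.
--
--     Encoding: hundreds are decomposed into multiples of 400 (ת), 300 (ש), 200 (ר), 100 (ק).
--     Tens and units follow standard gematria.
--     For years containing 15 or 16 in the tens+units: uses טו/טז (standard convention).
--
--     Examples:
--       786 → תשפו  (5786 = 2025/26)
--       780 → תשפ   (5780 = 2019/20)
--       700 → תש    (5700 = 1939/40)
--       744 → תשמד  (5744 = 1983/84)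
--       715 → תשטו  (5715 = 1954/55)
--     """
--     result = []
--
--     # Hundreds: 400=ת, 300=ש, 200=ר, 100=ק
--     while n >= 400:
--         result.append('ת')
--         n -= 400
--     if n >= 300:
--         result.append('ש')
--         n -= 300
--     elif n >= 200:
--         result.append('ר')
--         n -= 200
--     elif n >= 100:
--         result.append('ק')
--         n -= 100
--
--     # Special cases for 15, 16 (standard convention for year names)
--     if n == 15:
--         result.append('טו')
--         return ''.join(result)
--     if n == 16:
--         result.append('טז')
--         return ''.join(result)
--
--     # Tens
--     tens_map = {10:'י', 20:'כ', 30:'ל', 40:'מ', 50:'נ', 60:'ס', 70:'ע', 80:'פ', 90:'צ'}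
--     t = (n // 10) * 10
--     if t > 0:
--         result.append(tens_map[t])
--         n -= t
--
--     # Units
--     units_map = {1:'א', 2:'ב', 3:'ג', 4:'ד', 5:'ה', 6:'ו', 7:'ז', 8:'ח', 9:'ט'}
--     if n > 0:
--         result.append(units_map[n])
--
--     return ''.join(result)
-- ===== SOURCE B (Python) =====
-- def year_to_hebrew(n):
--     """Convert year value (e.g. 786 for 5786) to Hebrew letter string.
--
--     Closed-form arithmetic version: divmod instead of the subtract-down loop.
--     """
--     if n <= 0:
--         return ''
--     hund, rem = divmod(n, 100)
--     s = 'ת' * (hund // 4) + ('', 'ק', 'ר', 'ש')[hund % 4]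
--     if rem == 15:
--         return s + 'טו'
--     if rem == 16:
--         return s + 'טז'
--     t, u = divmod(rem, 10)
--     return (s + ('', 'י', 'כ', 'ל', 'מ', 'נ', 'ס', 'ע', 'פ', 'צ')[t]
--               + ('', 'א', 'ב', 'ג', 'ד', 'ה', 'ו', 'ז', 'ח', 'ט')[u])
-- ===== Notes on version B (the rewrite author's own statement) =====
-- stated objective: simpler
-- what changed: Replaces A's subtract-down while-loop and if/elif chain with closed-form divmod arithmetic: hundreds come from n//100 ('ת' repeated hund//4 plus a tuple-indexed letter for hund%4) and tens/units from divmod(n%100, 10) with tuple lookup tables, building the string by concatenation instead of a mutable result list.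
import Mathlib
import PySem

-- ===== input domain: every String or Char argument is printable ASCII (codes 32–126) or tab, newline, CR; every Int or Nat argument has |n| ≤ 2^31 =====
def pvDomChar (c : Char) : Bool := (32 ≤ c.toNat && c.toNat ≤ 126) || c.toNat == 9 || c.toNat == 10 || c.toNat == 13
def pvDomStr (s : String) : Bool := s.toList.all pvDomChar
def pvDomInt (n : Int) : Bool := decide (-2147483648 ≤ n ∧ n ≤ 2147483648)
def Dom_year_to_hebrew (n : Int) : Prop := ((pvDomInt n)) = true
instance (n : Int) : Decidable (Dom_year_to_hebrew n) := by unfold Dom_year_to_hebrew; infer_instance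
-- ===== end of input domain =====

-- B replaces A's subtract-down hundreds loop and mutable-list building with closed-form
-- divmod arithmetic and tuple-indexed lookup tables (objective: simpler).

-- ===== PORT A =====
-- tens_map / units_map (Python dicts; the lookups below are only reached with a key
-- that is present, so Python's KeyError is unreachable for integer inputs)
def pvTensMap : PySem.Dict Int String :=
  PySem.Dict.ofList [(10,"י"),(20,"כ"),(30,"ל"),(40,"מ"),(50,"נ"),(60,"ס"),(70,"ע"),(80,"פ"),(90,"צ")]
def pvUnitsMap : PySem.Dict Int String :=
  PySem.Dict.ofList [(1,"א"),(2,"ב"),(3,"ג"),(4,"ד"),(5,"ה"),(6,"ו"),(7,"ז"),(8,"ח"),(9,"ט")]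

-- everything after the special cases 15/16 are tested: tens, units, ''.join(result)
def pvLow (res : List String) (n : Int) : String :=
  if n = 15 then PySem.Str.join "" (res ++ ["טו"])
  else if n = 16 then PySem.Str.join "" (res ++ ["טז"])
  else
    let t := PySem.Int.floordiv n 10 * 10
    let res2 := if 0 < t then res ++ [(pvTensMap.get? t).getD ""] else res
    let n2 := if 0 < t then n - t else n
    let res3 := if 0 < n2 then res2 ++ [(pvUnitsMap.get? n2).getD ""] else res2
    PySem.Str.join "" res3

-- the 300/200/100 if/elif chain
def pvAfterHundreds (res : List String) (n : Int) : String :=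
  if 300 ≤ n then pvLow (res ++ ["ש"]) (n - 300)
  else if 200 ≤ n then pvLow (res ++ ["ר"]) (n - 200)
  else if 100 ≤ n then pvLow (res ++ ["ק"]) (n - 100)
  else pvLow res n

-- `while n >= 400` with fuel n.toNat (enough: the loop runs at most n.toNat times;
-- fuel 0 implies n ≤ 0, where the loop body never runs anyway)
def pvHundLoop : Nat → List String → Int → String
  | 0, res, n => pvAfterHundreds res n
  | f + 1, res, n =>
      if 400 ≤ n then pvHundLoop f (res ++ ["ת"]) (n - 400) else pvAfterHundreds res n

def year_to_hebrew (n : Int) : String := pvHundLoop n.toNat [] n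

-- ===== PORT B =====
def year_to_hebrew_alt (n : Int) : String :=
  if n ≤ 0 then "" else
  let hund := PySem.Int.floordiv n 100
  let rem  := PySem.Int.mod n 100
  -- 'ת' * (hund // 4)  +  ('', 'ק', 'ר', 'ש')[hund % 4]
  let s := String.ofList (List.replicate (PySem.Int.floordiv hund 4).toNat 'ת')
           ++ ((PySem.List.pyGet? ["", "ק", "ר", "ש"] (PySem.Int.mod hund 4)).getD "")
  if rem = 15 then s ++ "טו"
  else if rem = 16 then s ++ "טז"
  else
    let t := PySem.Int.floordiv rem 10
    let u := PySem.Int.mod rem 10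
    s ++ ((PySem.List.pyGet? ["", "י", "כ", "ל", "מ", "נ", "ס", "ע", "פ", "צ"] t).getD "")
      ++ ((PySem.List.pyGet? ["", "א", "ב", "ג", "ד", "ה", "ו", "ז", "ח", "ט"] u).getD "")

-- ===== PRECONDITION & SPEC =====
def Spec_year_to_hebrew (n : Int) (out : String) : Prop := out = year_to_hebrew_alt n
instance (n : Int) (out : String) : Decidable (Spec_year_to_hebrew n out) := by unfold Spec_year_to_hebrew; infer_instance

-- ===== CLAIM (what is proved, stated in full; the proofs are below) =====
def Claim_equal_year_to_hebrew : Prop := ∀ (n : Int), Dom_year_to_hebrew n → Spec_year_to_hebrew n (year_to_hebrew n)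

-- ===== LEMMAS AND PROOFS =====

-- ''.join with empty separator is list flattening
theorem pvInterNil : ∀ l : List (List Char), List.intercalate ([] : List Char) l = l.flatten := by
  intro l
  induction l with
  | nil => simp [List.intercalate]
  | cons a t ih =>
    cases t with
    | nil => simp [List.intercalate]
    | cons b u =>
      simp only [List.intercalate, List.intersperse] at *
      simp_all

-- ''.join distributes over list append
theorem pvJoin_append (a b : List String) :
    PySem.Str.join "" (a ++ b) = PySem.Str.join "" a ++ PySem.Str.join "" b := by
  simp [PySem.Str.join, PySem.Chars.join, pvInterNil, String.ofList_append]

theorem pvJoin_nil : PySem.Str.join "" ([] : List String) = "" := by decide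

theorem pvLow_prefix (res : List String) (n : Int) :
    pvLow res n = PySem.Str.join "" res ++ pvLow [] n := by
  unfold pvLow
  split_ifs <;> try simp [pvJoin_append]
  all_goals split_ifs <;> simp [pvJoin_append, pvJoin_nil]

theorem pvAfterHundreds_prefix (res : List String) (n : Int) :
    pvAfterHundreds res n = PySem.Str.join "" res ++ pvAfterHundreds [] n := by
  unfold pvAfterHundreds
  split_ifs
  · rw [List.nil_append, pvLow_prefix (res ++ ["ש"]), pvLow_prefix ["ש"]]
    simp [pvJoin_append, String.append_assoc]
  · rw [List.nil_append, pvLow_prefix (res ++ ["ר"]), pvLow_prefix ["ר"]]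
    simp [pvJoin_append, String.append_assoc]
  · rw [List.nil_append, pvLow_prefix (res ++ ["ק"]), pvLow_prefix ["ק"]]
    simp [pvJoin_append, String.append_assoc]
  · exact pvLow_prefix res n

-- fuel irrelevance: any fuel ≥ n makes pvHundLoop agree
theorem pvHundLoop_fuel : ∀ (f g : Nat) (res : List String) (n : Int),
    n ≤ (f : Int) → n ≤ (g : Int) → pvHundLoop f res n = pvHundLoop g res n := by
  intro f
  induction f with
  | zero =>
    intro g res n hf _
    cases g with
    | zero => rfl
    | succ h => simp [pvHundLoop, show ¬ (400:Int) ≤ n by omega]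
  | succ f ih =>
    intro g res n hf hg
    cases g with
    | zero => simp [pvHundLoop, show ¬ (400:Int) ≤ n by omega]
    | succ h =>
      by_cases hc : (400:Int) ≤ n
      · simp only [pvHundLoop, if_pos hc]
        exact ih h _ _ (by omega) (by omega)
      · simp [pvHundLoop, hc]

theorem pvHundLoop_prefix : ∀ (f : Nat) (res : List String) (n : Int),
    pvHundLoop f res n = PySem.Str.join "" res ++ pvHundLoop f [] n := by
  intro f
  induction f with
  | zero => intro res n; exact pvAfterHundreds_prefix res n
  | succ f ih =>
    intro res n
    by_cases hc : (400:Int) ≤ n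
    · simp only [pvHundLoop, if_pos hc]
      rw [ih (res ++ ["ת"]), ih ([] ++ ["ת"])]
      simp [pvJoin_append, String.append_assoc]
    · simp only [pvHundLoop, if_neg hc]
      exact pvAfterHundreds_prefix res n

-- A peels one ת when n > 400
theorem pvStepA (n : Int) (h : (400:Int) < n) :
    year_to_hebrew n = "ת" ++ year_to_hebrew (n - 400) := by
  unfold year_to_hebrew
  obtain ⟨m, hm⟩ : ∃ m, n.toNat = m + 1 := ⟨n.toNat - 1, by omega⟩
  rw [hm]
  simp only [pvHundLoop, if_pos (show (400:Int) ≤ n by omega)]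
  rw [pvHundLoop_prefix m ([] ++ ["ת"]) (n - 400),
      pvHundLoop_fuel m (n - 400).toNat [] (n - 400) (by omega) (by omega)]
  norm_num
  have hj : PySem.Str.join "" ["ת"] = "ת" := by decide
  rw [hj]

-- B peels one ת when n > 400
theorem pvStepB (n : Int) (h : (400:Int) < n) :
    year_to_hebrew_alt n = "ת" ++ year_to_hebrew_alt (n - 400) := by
  have e1 : PySem.Int.floordiv n 100 = n / 100 := PySem.Int.floordiv_eq_ediv_of_pos (by norm_num)
  have e2 : PySem.Int.floordiv (n - 400) 100 = n / 100 - 4 := by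
    rw [PySem.Int.floordiv_eq_ediv_of_pos (by norm_num)]; omega
  have e3 : PySem.Int.mod (n - 400) 100 = PySem.Int.mod n 100 := by
    rw [PySem.Int.mod_eq_emod_of_pos (by norm_num), PySem.Int.mod_eq_emod_of_pos (by norm_num)]
    omega
  have hq : (4:Int) ≤ n / 100 := by omega
  have e4 : ∀ q : Int, 4 ≤ q → (PySem.Int.floordiv q 4).toNat = (PySem.Int.floordiv (q - 4) 4).toNat + 1 := by
    intro q hq4
    rw [PySem.Int.floordiv_eq_ediv_of_pos (by norm_num), PySem.Int.floordiv_eq_ediv_of_pos (by norm_num)]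
    omega
  have e5 : ∀ q : Int, PySem.Int.mod (q - 4) 4 = PySem.Int.mod q 4 := by
    intro q
    rw [PySem.Int.mod_eq_emod_of_pos (by norm_num), PySem.Int.mod_eq_emod_of_pos (by norm_num)]
    omega
  have hrep : ∀ k : Nat, String.ofList (List.replicate (k + 1) 'ת')
      = "ת" ++ String.ofList (List.replicate k 'ת') := by
    intro k
    rw [List.replicate_succ, show ('ת' :: List.replicate k 'ת') = ['ת'] ++ List.replicate k 'ת' from rfl,
        String.ofList_append]
  have hn0 : ¬ n ≤ 0 := by omega
  have hn0' : ¬ n - 400 ≤ 0 := by omega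
  simp only [year_to_hebrew_alt, if_neg hn0, if_neg hn0', e1, e2, e3, e5, e4 _ hq, hrep]
  split_ifs <;> first | omega | simp [String.append_assoc]

-- the two ports agree up to 400 (finite check for 0 < n, direct argument for n ≤ 0)
set_option maxRecDepth 100000 in
theorem pvSmall (n : Int) (h : n < 401) : year_to_hebrew n = year_to_hebrew_alt n := by
  by_cases hp : n ≤ 0
  · have hz : n.toNat = 0 := by omega
    have hd : PySem.Int.floordiv n 10 = n / 10 := PySem.Int.floordiv_eq_ediv_of_pos (by norm_num)
    unfold year_to_hebrew
    rw [hz]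
    simp only [pvHundLoop, pvAfterHundreds,
      if_neg (show ¬ (300:Int) ≤ n by omega), if_neg (show ¬ (200:Int) ≤ n by omega),
      if_neg (show ¬ (100:Int) ≤ n by omega)]
    unfold pvLow
    rw [hd]
    simp only [if_neg (show n ≠ 15 by omega), if_neg (show n ≠ 16 by omega),
      if_neg (show ¬ (0:Int) < n / 10 * 10 by omega), if_neg (show ¬ (0:Int) < n by omega)]
    simp [year_to_hebrew_alt, hp, PySem.Str.join, PySem.Chars.join, List.intercalate]
  · have hfin : ∀ k : Fin 401, year_to_hebrew ((k : Nat) : Int) = year_to_hebrew_alt ((k : Nat) : Int) := by decide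
    have hn : n = ((n.toNat : Nat) : Int) := by omega
    have hlt : n.toNat < 401 := by omega
    rw [hn]
    exact hfin ⟨n.toNat, hlt⟩

theorem pvMain (n : Int) : year_to_hebrew n = year_to_hebrew_alt n := by
  by_cases h : n < 401
  · exact pvSmall n h
  · have h4 : (400:Int) < n := by omega
    rw [pvStepA n h4, pvStepB n h4, pvMain (n - 400)]
termination_by n.toNat
decreasing_by omega

-- ===== VERDICT (by name: the statement is the Claim_ definition above) =====
theorem year_to_hebrew_spec : Claim_equal_year_to_hebrew := by
  intro n _
  unfold Spec_year_to_hebrew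
  exact pvMain n
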